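-- pv_equiv track=rewrite | github.com/yeisson-venencia/adven-of-code-2024 | day_07/day_07_challenge_02.py | generate_operator_array
-- ===== SOURCE A (Python) =====
-- def base3number (n):
--     if n == 0:
--         return '0'
--     nums = []
--     while n:
--         n, r = divmod(n, 3)
--         nums.append(str(r))
--     return ''.join(reversed(nums))
--
-- def generate_operator_array(option, number_of_operators):
--     operations = ['+' for _ in range(number_of_operators)]
--     base3_string = base3number(option)
--     string_length = len(base3_string)
--     for index in range(string_length):
--         if base3_string[string_length -1-index] == '1':
--             operations[index] = '*'
--         if base3_string[string_length -1-index] == '2':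
--             operations[index] = '||'
--     return operations
-- ===== SOURCE B (Python) =====
-- def generate_operator_array(option, number_of_operators):
--     operations = ['+'] * number_of_operators
--     n = option
--     index = 0
--     while n:
--         n, r = divmod(n, 3)
--         if r == 1:
--             operations[index] = '*'
--         elif r == 2:
--             operations[index] = '||'
--         index += 1
--     return operations
-- ===== Notes on version B (the rewrite author's own statement) =====
-- stated objective: simpler
-- what changed: B drops the base-3 string construction, the reversal and the second indexing loop: one divmod loop over option writes '*'/'||' directly into the preallocated operations list, least-significant digit first.
import Mathlib
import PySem

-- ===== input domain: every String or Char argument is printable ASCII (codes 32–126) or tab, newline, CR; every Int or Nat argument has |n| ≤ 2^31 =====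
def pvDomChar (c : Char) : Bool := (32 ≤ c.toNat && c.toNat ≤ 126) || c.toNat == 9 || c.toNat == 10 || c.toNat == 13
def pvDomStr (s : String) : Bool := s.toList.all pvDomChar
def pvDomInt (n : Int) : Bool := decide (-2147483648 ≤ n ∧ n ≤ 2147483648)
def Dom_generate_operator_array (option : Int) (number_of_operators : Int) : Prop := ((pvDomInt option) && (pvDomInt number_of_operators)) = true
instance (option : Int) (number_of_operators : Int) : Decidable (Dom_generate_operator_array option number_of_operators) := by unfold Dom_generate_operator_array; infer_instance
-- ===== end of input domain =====

-- B replaces A's base-3 string construction + reversed-index loop by one divmod loop writing operators directly (objective: simpler).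

-- ===== PORT A =====
-- while n: n, r = divmod(n, 3); nums.append(str(r))
-- (guard '0 < n' instead of 'n ≠ 0': Python's loop diverges for n < 0, which Pre_ excludes)
def pvB3Loop (n : Int) (nums : List String) : List String :=
  if _h : 0 < n then
    pvB3Loop (PySem.Int.floordiv n 3) (nums ++ [PySem.Int.toStr (PySem.Int.mod n 3)])
  else nums
termination_by n.toNat
decreasing_by simp only [PySem.Int.floordiv_eq_ediv_of_pos (by omega : (0:Int) < 3)]; omega

def base3number (n : Int) : String :=
  if n = 0 then "0"
  else PySem.Str.join "" ((pvB3Loop n []).reverse)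

def generate_operator_array (option : Int) (number_of_operators : Int) : List String :=
  let operations := (PySem.List.pyRange 0 number_of_operators 1).map (fun _ => "+")
  let base3_string := base3number option
  let string_length : Int := PySem.Str.len base3_string
  (PySem.List.pyRange 0 string_length 1).foldl (fun ops index =>
    -- operations[index] = … ported as pySetD: out-of-range (IndexError) is excluded by Pre_
    let ops := if PySem.Str.pyGet? base3_string (string_length - 1 - index) = some '1'
               then PySem.List.pySetD ops index "*" else ops
    if PySem.Str.pyGet? base3_string (string_length - 1 - index) = some '2'
    then PySem.List.pySetD ops index "||" else ops) operations

-- ===== PORT B =====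
-- while n: n, r = divmod(n, 3); write '*' / '||' at index; index += 1
-- (guard '0 < n' instead of 'n ≠ 0': the Python loop diverges for n < 0, excluded by Pre_)
def pvAltLoop (n : Int) (operations : List String) (index : Int) : List String :=
  if _h : 0 < n then
    let r := PySem.Int.mod n 3
    let operations :=
      if r = 1 then PySem.List.pySetD operations index "*"
      else if r = 2 then PySem.List.pySetD operations index "||"
      else operations
    pvAltLoop (PySem.Int.floordiv n 3) operations (index + 1)
  else operations
termination_by n.toNat
decreasing_by simp only [PySem.Int.floordiv_eq_ediv_of_pos (by omega : (0:Int) < 3)]; omega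

def generate_operator_array_alt (option : Int) (number_of_operators : Int) : List String :=
  pvAltLoop option (List.replicate number_of_operators.toNat "+") 0

-- ===== PRECONDITION & SPEC =====
-- Pre_ excludes exactly the inputs where Python A does not return: option < 0 (the divmod
-- loop never terminates) and option ≥ 3^number_of_operators (operations[index] raises
-- IndexError at the highest base-3 digit).
def Pre_generate_operator_array (option : Int) (number_of_operators : Int) : Prop :=
  0 ≤ option ∧ option < 3 ^ number_of_operators.toNat
instance (option : Int) (number_of_operators : Int) : Decidable (Pre_generate_operator_array option number_of_operators) := by unfold Pre_generate_operator_array; infer_instance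

def pvWitness_generate_operator_array : Int × Int := (5, 2)

def Spec_generate_operator_array (option : Int) (number_of_operators : Int) (out : List String) : Prop := out = generate_operator_array_alt option number_of_operators
instance (option : Int) (number_of_operators : Int) (out : List String) : Decidable (Spec_generate_operator_array option number_of_operators out) := by unfold Spec_generate_operator_array; infer_instance

-- ===== CLAIM (what is proved, stated in full; the proofs are below) =====
def Claim_equal_generate_operator_array : Prop := ∀ (option : Int) (number_of_operators : Int), Dom_generate_operator_array option number_of_operators → Pre_generate_operator_array option number_of_operators → Spec_generate_operator_array option number_of_operators (generate_operator_array option number_of_operators)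

-- ===== LEMMAS AND PROOFS =====

-- proof helpers: the base-3 digit list of n, least-significant first
def pvDigits (n : Int) : List Int :=
  if h : 0 < n then PySem.Int.mod n 3 :: pvDigits (PySem.Int.floordiv n 3) else []
termination_by n.toNat
decreasing_by simp only [PySem.Int.floordiv_eq_ediv_of_pos (by omega : (0:Int) < 3)]; omega

-- applying a digit list to the operations list, starting at index i
def pvApply (ds : List Int) (ops : List String) (i : Int) : List String :=
  match ds with
  | [] => ops
  | r :: ds' =>
      pvApply ds'
        (if r = 1 then PySem.List.pySetD ops i "*"
         else if r = 2 then PySem.List.pySetD ops i "||" else ops) (i + 1)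

def pvCharOf (r : Int) : Char := if r = 1 then '1' else if r = 2 then '2' else '0'

theorem pvAltLoop_eq (n : Int) (ops : List String) (i : Int) :
    pvAltLoop n ops i = pvApply (pvDigits n) ops i := by
  rw [pvAltLoop, pvDigits]
  by_cases h : 0 < n
  · simp only [dif_pos h]
    exact pvAltLoop_eq (PySem.Int.floordiv n 3) _ (i + 1)
  · simp only [dif_neg h, pvApply]
termination_by n.toNat
decreasing_by simp only [PySem.Int.floordiv_eq_ediv_of_pos (by omega : (0:Int) < 3)]; omega

theorem pvB3Loop_eq (n : Int) (nums : List String) :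
    pvB3Loop n nums = nums ++ (pvDigits n).map PySem.Int.toStr := by
  rw [pvB3Loop, pvDigits]
  by_cases h : 0 < n
  · simp only [dif_pos h, List.map_cons]
    rw [pvB3Loop_eq (PySem.Int.floordiv n 3)]
    simp
  · simp only [dif_neg h, List.map_nil, List.append_nil]
termination_by n.toNat
decreasing_by simp only [PySem.Int.floordiv_eq_ediv_of_pos (by omega : (0:Int) < 3)]; omega

theorem pvDigits_mem (n : Int) : ∀ r ∈ pvDigits n, r = 0 ∨ r = 1 ∨ r = 2 := by
  rw [pvDigits]
  by_cases h : 0 < n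
  · simp only [dif_pos h]
    intro r hr
    rcases List.mem_cons.mp hr with rfl | hr'
    · rw [PySem.Int.mod_eq_emod_of_pos (by omega)]
      have h1 := Int.emod_nonneg n (by norm_num : (3:Int) ≠ 0)
      have h2 := Int.emod_lt_of_pos n (by norm_num : (0:Int) < 3)
      omega
    · exact pvDigits_mem (PySem.Int.floordiv n 3) r hr'
  · simp [dif_neg h]
termination_by n.toNat
decreasing_by simp only [PySem.Int.floordiv_eq_ediv_of_pos (by omega : (0:Int) < 3)]; omega

theorem pvToStr_digit (r : Int) (h : r = 0 ∨ r = 1 ∨ r = 2) :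
    (PySem.Int.toStr r).toList = [pvCharOf r] := by
  rcases h with rfl | rfl | rfl <;> decide

theorem pvBase3_toList (n : Int) (h : 0 < n) :
    (base3number n).toList = ((pvDigits n).map pvCharOf).reverse := by
  rw [base3number, if_neg (by omega), PySem.Str.toList_join, pvB3Loop_eq]
  simp only [List.nil_append, List.map_reverse]
  rw [List.map_map]
  have hmap : (pvDigits n).map (String.toList ∘ PySem.Int.toStr)
      = ((pvDigits n).map pvCharOf).map (fun c => [c]) := by
    rw [List.map_map]
    exact List.map_congr_left (fun r hr => pvToStr_digit r (pvDigits_mem n r hr))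
  rw [hmap, ← List.map_reverse]
  rw [show ("" : String).toList = [] from by decide, PySem.Chars.join_nil_singletons]

theorem pvFold_eq (s : String) (D : List Int)
    (hs : s.toList = (D.map pvCharOf).reverse)
    (k : Nat) (hk : k ≤ D.length) (ops : List String) :
    (PySem.List.pyRange (k : Int) (D.length : Int) 1).foldl
      (fun ops index =>
        if PySem.Str.pyGet? s ((D.length : Int) - 1 - index) = some '2'
        then PySem.List.pySetD
          (if PySem.Str.pyGet? s ((D.length : Int) - 1 - index) = some '1'
           then PySem.List.pySetD ops index "*" else ops) index "||"
        else (if PySem.Str.pyGet? s ((D.length : Int) - 1 - index) = some '1'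
              then PySem.List.pySetD ops index "*" else ops)) ops
    = pvApply (D.drop k) ops (k : Int) := by
  by_cases h : k < D.length
  · rw [PySem.List.pyRange_one_cons (by exact_mod_cast h)]
    simp only [List.foldl_cons]
    have hget : PySem.Str.pyGet? s ((D.length : Int) - 1 - (k : Int))
        = some (pvCharOf (D[k])) := by
      rw [show ((D.length : Int) - 1 - (k : Int)) = ((D.length - 1 - k : Nat) : Int) from by
            omega,
         PySem.Str.pyGet?_natCast, hs]
      rw [List.getElem?_reverse (by simp; omega)]
      simp only [List.length_map]
      rw [show D.length - 1 - (D.length - 1 - k) = k from by omega]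
      simp [List.getElem?_eq_getElem h]
    rw [hget]
    rw [show D.drop k = D[k] :: D.drop (k + 1) from (List.getElem_cons_drop h).symm, pvApply]
    simp only [Option.some.injEq]
    have hops : (if pvCharOf (D[k]) = '2'
        then PySem.List.pySetD
          (if pvCharOf (D[k]) = '1' then PySem.List.pySetD ops (k : Int) "*" else ops)
          (k : Int) "||"
        else (if pvCharOf (D[k]) = '1' then PySem.List.pySetD ops (k : Int) "*" else ops))
        = (if D[k] = 1 then PySem.List.pySetD ops (k : Int) "*"
           else if D[k] = 2 then PySem.List.pySetD ops (k : Int) "||" else ops) := by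
      by_cases h1 : D[k] = 1
      · simp [h1, pvCharOf]
      · by_cases h2 : D[k] = 2 <;> simp [h1, h2, pvCharOf]
    rw [hops]
    have hrec := pvFold_eq s D hs (k + 1) (by omega)
      (if D[k] = 1 then PySem.List.pySetD ops (k : Int) "*"
       else if D[k] = 2 then PySem.List.pySetD ops (k : Int) "||" else ops)
    rw [show ((k : Int) + 1) = (((k + 1 : Nat)) : Int) from by push_cast; ring]
    exact hrec
  · have hke : k = D.length := by omega
    subst hke
    rw [PySem.List.pyRange_one_eq_nil (le_refl _), List.drop_length]
    rfl
termination_by D.length - k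

theorem pvOps_eq (m : Int) :
    (PySem.List.pyRange 0 m 1).map (fun _ => ("+" : String))
      = List.replicate m.toNat "+" := by
  rw [PySem.List.pyRange_one, List.map_map]
  apply List.eq_replicate_iff.mpr
  refine ⟨by simp, ?_⟩
  intro b hb
  rcases List.mem_map.mp hb with ⟨x, -, rfl⟩
  rfl

-- ===== VERDICT (by name: the statement is the Claim_ definition above) =====
theorem generate_operator_array_spec : Claim_equal_generate_operator_array := by
  intro option number_of_operators _ hpre
  unfold Spec_generate_operator_array
  obtain ⟨h0, -⟩ := hpre
  have hA : generate_operator_array option number_of_operators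
      = (PySem.List.pyRange 0 (PySem.Str.len (base3number option)) 1).foldl
          (fun ops index =>
            if PySem.Str.pyGet? (base3number option)
                (PySem.Str.len (base3number option) - 1 - index) = some '2'
            then PySem.List.pySetD
              (if PySem.Str.pyGet? (base3number option)
                   (PySem.Str.len (base3number option) - 1 - index) = some '1'
               then PySem.List.pySetD ops index "*" else ops) index "||"
            else (if PySem.Str.pyGet? (base3number option)
                      (PySem.Str.len (base3number option) - 1 - index) = some '1'
                  then PySem.List.pySetD ops index "*" else ops))
          ((PySem.List.pyRange 0 number_of_operators 1).map fun _ => "+") := rfl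
  rw [hA, generate_operator_array_alt, pvAltLoop_eq, ← pvOps_eq]
  by_cases hz : option = 0
  · subst hz
    rw [show pvDigits 0 = [] from by rw [pvDigits]; simp, pvApply]
    rw [show base3number 0 = "0" from rfl,
        show PySem.Str.len "0" = 1 from by rw [PySem.Str.len_eq]; decide,
        show PySem.List.pyRange 0 1 1 = [0] from by decide]
    simp only [List.foldl_cons, List.foldl_nil]
    rw [show PySem.Str.pyGet? "0" (1 - 1 - 0) = some '0' from by
          rw [show (1 - 1 - 0 : Int) = ((0 : Nat) : Int) from by norm_num,
              PySem.Str.pyGet?_natCast]; decide]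
    simp
  · have hpos : 0 < option := by omega
    have hs := pvBase3_toList option hpos
    have hlen : PySem.Str.len (base3number option) = ((pvDigits option).length : Int) := by
      rw [PySem.Str.len_eq, hs]; simp
    rw [hlen]
    have hfold := pvFold_eq (base3number option) (pvDigits option) hs 0 (by omega)
      ((PySem.List.pyRange 0 number_of_operators 1).map fun _ => "+")
    simpa using hfold
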